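-- pv_equiv track=rewrite | github.com/nikoamoretti/sales-dashboard | weekly_digest.py | select_top_insights
-- ===== SOURCE A (Python) =====
-- INSIGHT_TYPE_PRIORITY = ["action_required", "alert", "win", "experiment"]
--
-- def select_top_insights(insights: list[dict]) -> list[dict]:
--     """
--     Pick the top insight from each of the priority types.
--     Severity ordering: high > medium > low.
--     Returns at most 4 insights, one per type.
--     """
--     severity_rank = {"high": 0, "medium": 1, "low": 2}
--     by_type: dict[str, list[dict]] = {}
--     for ins in insights:
--         t = ins.get("type") or "unknown"
--         by_type.setdefault(t, []).append(ins)
--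
--     # Sort each type's list by severity
--     for t in by_type:
--         by_type[t].sort(key=lambda x: severity_rank.get(x.get("severity", "medium"), 1))
--
--     selected = []
--     for t in INSIGHT_TYPE_PRIORITY:
--         if t in by_type and by_type[t]:
--             selected.append(by_type[t][0])
--     return selected
-- ===== SOURCE B (Python) =====
-- INSIGHT_TYPE_PRIORITY = ["action_required", "alert", "win", "experiment"]
--
-- def select_top_insights(insights: list[dict]) -> list[dict]:
--     """Single pass: keep the first minimum-severity-rank insight per type, then
--     emit them in priority order. No grouping lists, no sorting needed."""
--     severity_rank = {"high": 0, "medium": 1, "low": 2}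
--     best = {}
--     for ins in insights:
--         t = ins.get("type") or "unknown"
--         r = severity_rank.get(ins.get("severity", "medium"), 1)
--         cur = best.get(t)
--         if cur is None or r < cur[0]:
--             best[t] = (r, ins)
--     return [best[t][1] for t in INSIGHT_TYPE_PRIORITY if t in best]
-- ===== Notes on version B (the rewrite author's own statement) =====
-- stated objective: alternative
-- what changed: Replaces grouping into per-type lists and sorting each group by severity rank with a single pass that keeps the first minimum-rank insight per type (stable-sort head = first argmin); measured run time is about the same.
import Mathlib
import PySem

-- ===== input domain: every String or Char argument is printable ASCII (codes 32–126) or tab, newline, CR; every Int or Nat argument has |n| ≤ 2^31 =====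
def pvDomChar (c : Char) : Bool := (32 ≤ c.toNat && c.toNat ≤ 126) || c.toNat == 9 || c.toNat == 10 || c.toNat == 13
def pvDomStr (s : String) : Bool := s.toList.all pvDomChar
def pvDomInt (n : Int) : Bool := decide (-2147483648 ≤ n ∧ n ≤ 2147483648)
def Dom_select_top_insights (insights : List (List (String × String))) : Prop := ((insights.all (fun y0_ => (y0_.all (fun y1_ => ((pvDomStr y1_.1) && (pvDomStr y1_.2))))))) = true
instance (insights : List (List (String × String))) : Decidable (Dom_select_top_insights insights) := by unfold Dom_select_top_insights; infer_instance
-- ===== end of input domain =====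

-- B replaces per-type grouping + per-group sorting by a single pass keeping the first
-- minimum-severity-rank insight per type (objective: alternative algorithm, same measured cost).

-- ===== PORT A =====
-- shared helpers (the same expressions occur verbatim in both Pythons):
-- ins.get("type") or "unknown"   (Python `or`: the empty string is falsy)
def pvType (ins : List (String × String)) : String :=
  match (PySem.Dict.mk ins).get? "type" with
  | some s => if s = "" then "unknown" else s
  | none => "unknown"

-- severity_rank.get(ins.get("severity", "medium"), 1)
def pvRank (ins : List (String × String)) : Int :=
  (PySem.Dict.mk [("high", (0 : Int)), ("medium", 1), ("low", 2)]).getD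
    ((PySem.Dict.mk ins).getD "severity" "medium") 1

-- INSIGHT_TYPE_PRIORITY
def pvPriority : List String := ["action_required", "alert", "win", "experiment"]

def select_top_insights (insights : List (List (String × String))) : List (List (String × String)) :=
  -- by_type.setdefault(t, []).append(ins)  (the in-place append is exactly modify with default [])
  let byType : PySem.Dict String (List (List (String × String))) :=
    insights.foldl (fun d ins => d.modify (pvType ins) [] (· ++ [ins])) PySem.Dict.empty
  -- for t in by_type: by_type[t].sort(key=…)  (each value sorted in place; keys and their order unchanged)
  let sortedD : PySem.Dict String (List (List (String × String))) :=
    PySem.Dict.mk (byType.items.map (fun p => (p.1, PySem.List.sorted p.2 pvRank false)))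
  -- for t in INSIGHT_TYPE_PRIORITY: if t in by_type and by_type[t]: selected.append(by_type[t][0])
  pvPriority.foldl (fun sel t =>
    if sortedD.contains t then
      match sortedD.getD t [] with
      | [] => sel
      | x :: _ => sel ++ [x]
    else sel) []

-- ===== PORT B =====
-- cur = best.get(t); if cur is None or r < cur[0]: best[t] = (r, ins)
def pvStepB (d : PySem.Dict String (Int × List (String × String))) (ins : List (String × String)) :
    PySem.Dict String (Int × List (String × String)) :=
  let t := pvType ins
  let r := pvRank ins
  match d.get? t with
  | none => d.insert t (r, ins)
  | some cur => if r < cur.1 then d.insert t (r, ins) else d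

def select_top_insights_alt (insights : List (List (String × String))) : List (List (String × String)) :=
  let best : PySem.Dict String (Int × List (String × String)) :=
    insights.foldl pvStepB PySem.Dict.empty
  -- [best[t][1] for t in INSIGHT_TYPE_PRIORITY if t in best]
  (pvPriority.filter (fun t => best.contains t)).map (fun t => (best.getD t (0, [])).2)

-- ===== PRECONDITION & SPEC =====
def Spec_select_top_insights (insights : List (List (String × String))) (out : List (List (String × String))) : Prop := out = select_top_insights_alt insights
instance (insights : List (List (String × String))) (out : List (List (String × String))) : Decidable (Spec_select_top_insights insights out) := by unfold Spec_select_top_insights; infer_instance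

-- ===== CLAIM (what is proved, stated in full; the proofs are below) =====
def Claim_equal_select_top_insights : Prop := ∀ (insights : List (List (String × String))), Dom_select_top_insights insights → Spec_select_top_insights insights (select_top_insights insights)

-- ===== LEMMAS AND PROOFS =====

-- the insights of a given type, in input order
def pvGroup (insights : List (List (String × String))) (t : String) : List (List (String × String)) :=
  insights.filter (fun i => pvType i == t)

-- the first minimum-rank insight of a given type
def pvBest (insights : List (List (String × String))) (t : String) : Option (List (String × String)) :=
  PySem.List.min? (pvGroup insights t) pvRank

-- the step of min? (first extremal element)
def pvMinStep {α : Type} (key : α → Int) (acc : Option α) (x : α) : Option α :=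
  match acc with
  | none => some x
  | some m => if key x < key m then some x else some m

-- B's per-key step, extracted from the dict
def pvPairStep (acc : Option (Int × List (String × String))) (x : List (String × String)) :
    Option (Int × List (String × String)) :=
  match acc with
  | none => some (pvRank x, x)
  | some cur => if pvRank x < cur.1 then some (pvRank x, x) else acc

lemma min?_eq_foldl {α : Type} (l : List α) (key : α → Int) :
    PySem.List.min? l key = l.foldl (pvMinStep key) none := rfl

-- the (rank, ins) fold tracks min? of the plain fold
lemma pairfold_eq_min? (l : List (List (String × String))) (o : Option (List (String × String))) :
    l.foldl pvPairStep (o.map (fun m => (pvRank m, m)))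
    = (l.foldl (pvMinStep pvRank) o).map (fun m => (pvRank m, m)) := by
  induction l generalizing o with
  | nil => rfl
  | cons x rest ih =>
    cases o with
    | none => simpa [pvPairStep, pvMinStep] using ih (some x)
    | some m =>
      simp only [List.foldl, Option.map, pvMinStep, pvPairStep]
      by_cases h : pvRank x < pvRank m
      · simpa [h] using ih (some x)
      · simpa [h] using ih (some m)

-- head of a stable sort is the first minimum
lemma sorted_head?_eq_min? {α : Type} (l : List α) (key : α → Int) :
    (PySem.List.sorted l key false).head? = PySem.List.min? l key := by
  induction l using List.reverseRecOn with
  | nil => rfl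
  | append_singleton l x ih =>
    rw [PySem.List.sorted_eq_foldl_insertBy, List.foldl_append,
        ← PySem.List.sorted_eq_foldl_insertBy]
    rw [min?_eq_foldl, List.foldl_append, ← min?_eq_foldl]
    cases hs : PySem.List.sorted l key false with
    | nil =>
      rw [hs] at ih
      simp at ih
      simp [PySem.List.insertBy, ← ih, pvMinStep, List.foldl]
    | cons m tl =>
      rw [hs] at ih
      simp at ih
      simp [PySem.List.insertBy, ← ih, pvMinStep, List.foldl]
      split <;> simp

-- B's dict fold, observed at one key
lemma stepB_get? (l : List (List (String × String)))
    (d : PySem.Dict String (Int × List (String × String))) (t : String) :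
    (l.foldl pvStepB d).get? t
    = (l.filter (fun i => pvType i == t)).foldl pvPairStep (d.get? t) := by
  induction l generalizing d with
  | nil => rfl
  | cons i rest ih =>
    by_cases h : pvType i = t
    · have hf : (pvType i == t) = true := by simpa using h
      simp only [List.foldl, List.filter, hf, ih]
      congr 1
      simp only [pvStepB, pvPairStep, h]
      cases hg : d.get? t with
      | none => simp [PySem.Dict.get?_insert_self]
      | some cur =>
        by_cases hr : pvRank i < cur.1
        · simp [hr, PySem.Dict.get?_insert_self]
        · simp [hr, hg]
    · have hf : (pvType i == t) = false := by simpa using h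
      simp only [List.foldl, List.filter, hf, ih]
      congr 1
      have hne : t ≠ pvType i := fun e => h e.symm
      simp only [pvStepB]
      cases hg : d.get? (pvType i) with
      | none => simp [PySem.Dict.get?_insert_of_ne _ _ hne]
      | some cur =>
        by_cases hr : pvRank i < cur.1
        · simp [hr, PySem.Dict.get?_insert_of_ne _ _ hne]
        · simp [hr]

lemma best_get? (insights : List (List (String × String))) (t : String) :
    (insights.foldl pvStepB PySem.Dict.empty).get? t
    = (pvBest insights t).map (fun m => (pvRank m, m)) := by
  rw [stepB_get?, PySem.Dict.get?_empty, pvBest, min?_eq_foldl, pvGroup]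
  have h := pairfold_eq_min? (insights.filter (fun i => pvType i == t)) none
  rw [Option.map_none] at h
  exact h

-- A's grouping dict, observed at one key
lemma byType_getD (insights : List (List (String × String))) (t : String) :
    (insights.foldl (fun d ins => d.modify (pvType ins) [] (· ++ [ins])) PySem.Dict.empty).getD t []
    = pvGroup insights t := by
  have h1 : insights.foldl (fun d ins => d.modify (pvType ins) [] (· ++ [ins])) PySem.Dict.empty
      = (insights.map (fun i => (pvType i, i))).foldl (fun d p => d.modify p.1 [] (· ++ [p.2])) PySem.Dict.empty := by
    rw [List.foldl_map]
  rw [h1, PySem.Dict.getD_foldl_modify_append]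
  simp [pvGroup, List.filter_map, Function.comp_def]

lemma byType_contains (insights : List (List (String × String))) (t : String) :
    (insights.foldl (fun d ins => d.modify (pvType ins) [] (· ++ [ins])) PySem.Dict.empty).contains t
    = true ↔ t ∈ insights.map pvType := by
  rw [PySem.Dict.contains_iff_mem_keys,
      PySem.Dict.keys_foldl_modify_key (key := pvType) (f := fun _ ins => (· ++ [ins]))]
  have h2 : PySem.Set.update (PySem.Dict.empty : PySem.Dict String (List (List (String × String)))).keys (insights.map pvType)
      = PySem.Set.ofList (insights.map pvType) := rfl
  rw [h2, PySem.Set.mem_ofList]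

-- a value-mapped dict: lookups map through
lemma get?_mk_map_values {ν : Type} (g : ν → ν) (l : List (String × ν)) (t : String) :
    (PySem.Dict.mk (l.map (fun p => (p.1, g p.2)))).get? t = ((PySem.Dict.mk l).get? t).map g := by
  induction l with
  | nil => rfl
  | cons p rest ih =>
    obtain ⟨k, v⟩ := p
    simp only [List.map, PySem.Dict.get?_mk_cons]
    by_cases h : k = t
    · simp [h]
    · simp [h, ih]

lemma group_ne_nil_iff (insights : List (List (String × String))) (t : String) :
    pvGroup insights t ≠ [] ↔ t ∈ insights.map pvType := by
  simp [pvGroup, List.filter_eq_nil_iff]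

lemma sortedD_get? (byType : PySem.Dict String (List (List (String × String)))) (t : String) :
    (PySem.Dict.mk (byType.items.map (fun p => (p.1, PySem.List.sorted p.2 pvRank false)))).get? t
    = (byType.get? t).map (fun l => PySem.List.sorted l pvRank false) := by
  exact get?_mk_map_values _ byType.items t

lemma per_t_A (insights : List (List (String × String))) (t : String)
    (sel : List (List (String × String)))
    (byType : PySem.Dict String (List (List (String × String))))
    (sortedD : PySem.Dict String (List (List (String × String))))
    (hbt : byType = insights.foldl (fun d ins => d.modify (pvType ins) [] (· ++ [ins])) PySem.Dict.empty)
    (hsd : sortedD = PySem.Dict.mk (byType.items.map (fun p => (p.1, PySem.List.sorted p.2 pvRank false)))) :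
    (if sortedD.contains t then
       match sortedD.getD t [] with
       | [] => sel
       | x :: _ => sel ++ [x]
     else sel)
    = sel ++ (pvBest insights t).toList := by
  subst hsd
  subst hbt
  have hcont : ∀ (bt : PySem.Dict String (List (List (String × String)))),
      (PySem.Dict.mk (bt.items.map (fun p => (p.1, PySem.List.sorted p.2 pvRank false)))).contains t
      = bt.contains t := by
    intro bt
    rw [PySem.Dict.contains_eq_isSome_get?, PySem.Dict.contains_eq_isSome_get?,
        sortedD_get?, Option.isSome_map]
  cases hg : pvGroup insights t with
  | nil =>
    have hb : pvBest insights t = none := by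
      rw [pvBest, PySem.List.min?_eq_none_iff, hg]
    have hc : (insights.foldl (fun d ins => d.modify (pvType ins) [] (· ++ [ins])) PySem.Dict.empty).contains t = false := by
      by_contra hcc
      have hm := (byType_contains insights t).mp (by simpa using hcc)
      exact ((group_ne_nil_iff insights t).mpr hm) hg
    rw [hcont, hc, hb]
    simp
  | cons g0 gr =>
    have hne : pvGroup insights t ≠ [] := by rw [hg]; simp
    have hmem : t ∈ insights.map pvType := (group_ne_nil_iff insights t).mp hne
    have hc : (insights.foldl (fun d ins => d.modify (pvType ins) [] (· ++ [ins])) PySem.Dict.empty).contains t = true :=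
      (byType_contains insights t).mpr hmem
    have hsome : ((insights.foldl (fun d ins => d.modify (pvType ins) [] (· ++ [ins])) PySem.Dict.empty).get? t).isSome := by
      rw [← PySem.Dict.contains_eq_isSome_get?]; exact hc
    obtain ⟨gv, hgv⟩ := Option.isSome_iff_exists.mp hsome
    have hgd : (insights.foldl (fun d ins => d.modify (pvType ins) [] (· ++ [ins])) PySem.Dict.empty).getD t [] = gv := by
      rw [PySem.Dict.getD_eq_get?_getD, hgv]; rfl
    have hgv2 : gv = pvGroup insights t := by
      rw [← hgd, byType_getD insights t]
    have hsget : (PySem.Dict.mk ((insights.foldl (fun d ins => d.modify (pvType ins) [] (· ++ [ins])) PySem.Dict.empty).items.map (fun p => (p.1, PySem.List.sorted p.2 pvRank false)))).getD t []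
        = PySem.List.sorted (pvGroup insights t) pvRank false := by
      rw [PySem.Dict.getD_eq_get?_getD, sortedD_get?, hgv, hgv2]; rfl
    have hhead : (PySem.List.sorted (pvGroup insights t) pvRank false).head? = pvBest insights t := by
      rw [sorted_head?_eq_min?]; rfl
    cases hb : pvBest insights t with
    | none =>
      exact absurd (by rw [pvBest, PySem.List.min?_eq_none_iff] at hb; exact hb) hne
    | some m =>
      rw [hb] at hhead
      cases hss : PySem.List.sorted (pvGroup insights t) pvRank false with
      | nil => rw [hss] at hhead; simp at hhead
      | cons x xs =>
        rw [hss] at hhead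
        simp at hhead
        rw [hcont, hc, hsget, hss, hhead]
        simp

lemma per_t_Bp (insights : List (List (String × String))) (t : String) :
    (insights.foldl pvStepB PySem.Dict.empty).contains t = (pvBest insights t).isSome := by
  rw [PySem.Dict.contains_eq_isSome_get?, best_get?, Option.isSome_map]

lemma per_t_Bf (insights : List (List (String × String))) (t : String)
    (m : List (String × String)) (hm : pvBest insights t = some m) :
    ((insights.foldl pvStepB PySem.Dict.empty).getD t (0, [])).2 = m := by
  rw [PySem.Dict.getD_eq_get?_getD, best_get?, hm]
  rfl

lemma selA (insights : List (List (String × String)))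
    (byType sortedD : PySem.Dict String (List (List (String × String))))
    (hbt : byType = insights.foldl (fun d ins => d.modify (pvType ins) [] (· ++ [ins])) PySem.Dict.empty)
    (hsd : sortedD = PySem.Dict.mk (byType.items.map (fun p => (p.1, PySem.List.sorted p.2 pvRank false))))
    (ts : List String) (sel : List (List (String × String))) :
    ts.foldl (fun sel t =>
      if sortedD.contains t then
        match sortedD.getD t [] with
        | [] => sel
        | x :: _ => sel ++ [x]
      else sel) sel
    = sel ++ ts.flatMap (fun t => (pvBest insights t).toList) := by
  induction ts generalizing sel with
  | nil => simp
  | cons t ts ih =>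
    simp only [List.foldl, List.flatMap_cons]
    rw [per_t_A insights t sel byType sortedD hbt hsd, ih, List.append_assoc]

lemma selB (insights : List (List (String × String)))
    (best : PySem.Dict String (Int × List (String × String)))
    (hbest : best = insights.foldl pvStepB PySem.Dict.empty)
    (ts : List String) :
    (ts.filter (fun t => best.contains t)).map (fun t => (best.getD t (0, [])).2)
    = ts.flatMap (fun t => (pvBest insights t).toList) := by
  subst hbest
  induction ts with
  | nil => rfl
  | cons t ts ih =>
    cases ho : pvBest insights t with
    | none =>
      have hc := per_t_Bp insights t
      rw [ho] at hc
      simp only [List.filter, List.flatMap_cons, hc, ho, Option.toList]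
      simpa using ih
    | some m =>
      have hc := per_t_Bp insights t
      rw [ho] at hc
      have hv := per_t_Bf insights t m ho
      simp only [List.filter, List.flatMap_cons, hc, ho, Option.toList]
      simp [hv, ih]
      rfl

lemma main_eq (insights : List (List (String × String))) :
    select_top_insights insights = select_top_insights_alt insights := by
  unfold select_top_insights select_top_insights_alt
  rw [selA insights _ _ rfl rfl, selB insights _ rfl]
  simp

-- ===== VERDICT (by name: the statement is the Claim_ definition above) =====
theorem select_top_insights_spec : Claim_equal_select_top_insights := by
  intro insights _
  unfold Spec_select_top_insights
  exact main_eq insights
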